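-- pv_equiv track=rewrite | github.com/hysaryn/multi-agent-flood-prediction-communication | backend/app/services/risk_overview_agent.py | _get_max_urgency
-- ===== SOURCE A (Python) =====
-- from typing import Dict, List, Optional, Tuple
--
-- def _get_max_urgency(urgency_levels: List[str]) -> str:
--     """Get the highest urgency level from a list."""
--     urgency_hierarchy = ["none", "low", "moderate", "urgent", "immediate"]
--     max_urgency = "none"
--     for urgency in urgency_levels:
--         if urgency in urgency_hierarchy:
--             if urgency_hierarchy.index(urgency) > urgency_hierarchy.index(max_urgency):
--                 max_urgency = urgency
--     return max_urgency
-- ===== SOURCE B (Python) =====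
-- def _get_max_urgency(urgency_levels):
--     """Get the highest urgency level from a list."""
--     present = set(urgency_levels)
--     for level in ("immediate", "urgent", "moderate", "low"):
--         if level in present:
--             return level
--     return "none"
-- ===== Notes on version B (the rewrite author's own statement) =====
-- stated objective: idiomatic
-- what changed: B builds a membership set once and scans the fixed hierarchy from highest to lowest, returning the first level present, instead of A's loop over the input keeping a running max by repeated list.index lookups.
import Mathlib
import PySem

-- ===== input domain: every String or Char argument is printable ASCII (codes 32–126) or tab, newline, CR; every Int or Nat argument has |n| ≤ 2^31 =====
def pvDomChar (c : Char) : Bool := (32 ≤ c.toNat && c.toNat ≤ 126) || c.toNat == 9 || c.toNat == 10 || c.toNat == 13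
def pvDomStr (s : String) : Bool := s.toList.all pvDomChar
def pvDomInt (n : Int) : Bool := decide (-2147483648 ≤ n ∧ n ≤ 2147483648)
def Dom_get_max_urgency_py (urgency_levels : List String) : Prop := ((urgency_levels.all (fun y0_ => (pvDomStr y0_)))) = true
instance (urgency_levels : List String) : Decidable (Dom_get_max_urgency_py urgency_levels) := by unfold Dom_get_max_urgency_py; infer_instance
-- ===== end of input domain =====

-- B scans the fixed hierarchy from highest to lowest against a membership set built once,
-- instead of A's running max-by-index over the input; objective: more idiomatic (equal value proved).

-- ===== PORT A =====
def get_max_urgency_py (urgency_levels : List String) : String :=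
  let urgency_hierarchy : List String := ["none", "low", "moderate", "urgent", "immediate"]
  urgency_levels.foldl
    (fun max_urgency urgency =>
      if urgency_hierarchy.contains urgency then
        if (PySem.List.index? urgency_hierarchy urgency).getD 0
            > (PySem.List.index? urgency_hierarchy max_urgency).getD 0 then
          urgency
        else max_urgency
      else max_urgency)
    "none"

-- ===== PORT B =====
def get_max_urgency_py_alt (urgency_levels : List String) : String :=
  let present : PySem.Set String := PySem.Set.ofList urgency_levels
  (["immediate", "urgent", "moderate", "low"].find?
    (fun level => PySem.Set.contains present level)).getD "none"

-- ===== PRECONDITION & SPEC =====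
def Spec_get_max_urgency_py (urgency_levels : List String) (out : String) : Prop := out = get_max_urgency_py_alt urgency_levels
instance (urgency_levels : List String) (out : String) : Decidable (Spec_get_max_urgency_py urgency_levels out) := by unfold Spec_get_max_urgency_py; infer_instance

-- ===== CLAIM (what is proved, stated in full; the proofs are below) =====
def Claim_equal_get_max_urgency_py : Prop := ∀ (urgency_levels : List String), Dom_get_max_urgency_py urgency_levels → Spec_get_max_urgency_py urgency_levels (get_max_urgency_py urgency_levels)

-- ===== LEMMAS AND PROOFS =====

-- the fixed hierarchy
def pvH : List String := ["none", "low", "moderate", "urgent", "immediate"]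

-- A's loop body
def pvStep (max_urgency urgency : String) : String :=
  if pvH.contains urgency then
    if (PySem.List.index? pvH urgency).getD 0 > (PySem.List.index? pvH max_urgency).getD 0 then
      urgency
    else max_urgency
  else max_urgency

-- select the highest level among four presence flags (highest first)
def pvSel (c1 c2 c3 c4 : Bool) : String :=
  if c1 then "immediate" else if c2 then "urgent" else if c3 then "moderate"
  else if c4 then "low" else "none"

-- B as a function of the four membership flags
theorem alt_char (xs : List String) :
    get_max_urgency_py_alt xs =
      pvSel (xs.contains "immediate") (xs.contains "urgent")
        (xs.contains "moderate") (xs.contains "low") := by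
  simp only [get_max_urgency_py_alt, List.find?, pvSel, PySem.Set.contains,
    PySem.Set.mem_ofList, List.contains_eq_mem]
  by_cases h1 : "immediate" ∈ xs <;> by_cases h2 : "urgent" ∈ xs <;>
    by_cases h3 : "moderate" ∈ xs <;> by_cases h4 : "low" ∈ xs <;>
    simp [h1, h2, h3, h4]

-- B's value is always in the hierarchy
theorem alt_mem (xs : List String) : get_max_urgency_py_alt xs ∈ pvH := by
  rw [alt_char]; unfold pvSel; split_ifs <;> simp [pvH]

-- take the higher of two hierarchy levels (by index)
def pvMax (a b : String) : String :=
  if (PySem.List.index? pvH b).getD 0 > (PySem.List.index? pvH a).getD 0 then b else a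

-- one step of A's loop against the flag form of B (concrete levels, abstract flags)
theorem key (a x : String) (ha : a ∈ pvH) (hx : x ∈ pvH) : ∀ c1 c2 c3 c4 : Bool,
    pvMax (pvStep a x) (pvSel c1 c2 c3 c4) =
      pvMax a (pvSel (("immediate" == x) || c1) (("urgent" == x) || c2)
        (("moderate" == x) || c3) (("low" == x) || c4)) := by
  fin_cases hx <;> fin_cases ha <;> decide

-- loop invariant: folding A's step from a computes the max of a and B's answer
theorem fold_eq (xs : List String) : ∀ a, a ∈ pvH →
    xs.foldl pvStep a = pvMax a (get_max_urgency_py_alt xs) := by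
  induction xs with
  | nil =>
    intro a ha
    rw [alt_char]
    fin_cases ha <;> decide
  | cons x xs ih =>
    intro a ha
    by_cases hx : x ∈ pvH
    · have hmem : pvStep a x ∈ pvH := by
        unfold pvStep; split_ifs <;> first | exact hx | exact ha
      have hstep : List.foldl pvStep a (x :: xs) = List.foldl pvStep (pvStep a x) xs := rfl
      rw [hstep, ih _ hmem, alt_char, alt_char (x :: xs)]
      simp only [List.contains_cons]
      exact key a x ha hx _ _ _ _
    · have hstep : List.foldl pvStep a (x :: xs) = List.foldl pvStep a xs := by
        simp [List.foldl, pvStep, hx]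
      have hne : ∀ l : String, l ∈ pvH → (l == x) = false := by
        intro l hl
        simp only [beq_eq_false_iff_ne]
        intro h; exact hx (h ▸ hl)
      rw [hstep, ih a ha, alt_char, alt_char (x :: xs)]
      simp only [List.contains_cons]
      rw [hne "immediate" (by decide), hne "urgent" (by decide),
        hne "moderate" (by decide), hne "low" (by decide)]
      simp

-- pvMax "none" b = b for b in the hierarchy
theorem pvMax_none (b : String) (hb : b ∈ pvH) : pvMax "none" b = b := by
  fin_cases hb <;> decide

-- ===== VERDICT (by name: the statement is the Claim_ definition above) =====
theorem get_max_urgency_py_spec : Claim_equal_get_max_urgency_py := by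
  intro xs _
  unfold Spec_get_max_urgency_py
  have hA : get_max_urgency_py xs = xs.foldl pvStep "none" := rfl
  rw [hA, fold_eq xs "none" (by decide), pvMax_none _ (alt_mem xs)]
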